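-- pv_equiv track=rewrite | github.com/Evindori/python_algebra_practise | 3.py | deliteli
-- ===== SOURCE A (Python) =====
-- def deliteli(n):
--     deliteli = set()
--     k = 2
--     while k**2 <= n:
--         if n%k == 0:
--             deliteli.add(k)
--             deliteli.add(n//k)
--         k += 1
--     return deliteli
-- ===== SOURCE B (Python) =====
-- def deliteli(n):
--     if n < 4:
--         return set()
--     # factor n into prime powers by repeatedly dividing out the smallest factor
--     m = n
--     pairs = []
--     p = 2
--     while p * p <= m:
--         if m % p == 0:
--             e = 0
--             while m % p == 0:
--                 m //= p
--                 e += 1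
--             pairs.append((p, e))
--         p += 1
--     if m > 1:
--         pairs.append((m, 1))
--     # multiply the prime powers out into the full divisor list
--     divs = [1]
--     for (p, e) in pairs:
--         divs = [d * p ** i for d in divs for i in range(e + 1)]
--     # emit each small divisor with its cofactor
--     small = sorted(d for d in set(divs) if d >= 2 and d * d <= n)
--     res = set()
--     for d in small:
--         res.add(d)
--         res.add(n // d)
--     return res
-- ===== Notes on version B (the rewrite author's own statement) =====
-- stated objective: alternative
-- what changed: B factorizes n into prime powers by dividing out each smallest factor (so the trial bound shrinks with the remaining cofactor), multiplies the prime powers out into the full divisor list, and then emits each sorted small divisor with its cofactor, instead of A's single trial-division scan of every k up to sqrt(n) adding k and n//k per hit.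
import Mathlib
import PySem

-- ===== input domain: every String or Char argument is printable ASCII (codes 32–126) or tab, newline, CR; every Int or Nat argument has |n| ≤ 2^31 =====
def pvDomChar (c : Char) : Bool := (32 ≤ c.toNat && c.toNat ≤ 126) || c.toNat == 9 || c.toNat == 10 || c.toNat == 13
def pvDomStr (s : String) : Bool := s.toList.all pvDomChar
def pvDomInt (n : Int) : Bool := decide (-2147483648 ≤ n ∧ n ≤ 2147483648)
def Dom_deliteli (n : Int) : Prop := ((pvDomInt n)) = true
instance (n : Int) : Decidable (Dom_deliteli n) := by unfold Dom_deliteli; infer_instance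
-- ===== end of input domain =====

-- B factorizes n into prime powers, multiplies them out into the divisor list and emits each
-- sorted small divisor with its cofactor, instead of A's trial-division scan of every k ≤ √n.

-- ===== PORT A =====
-- termination bound for A's loop (cited by name in its decreasing_by)
lemma deliteliLoop_dec (n k : Int) (h : k ^ 2 ≤ n) :
    (n + 2 - (k + 1)).toNat < (n + 2 - k).toNat := by
  have hk : k ≤ n := by
    by_cases h0 : k ≤ 0
    · nlinarith [mul_self_nonneg k]
    · nlinarith
  omega

-- A's while loop: while k**2 <= n, on a divisor hit add k and its cofactor n//k
def deliteliLoop (n k : Int) (s : List Int) : List Int :=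
  if h : k ^ 2 ≤ n then
    deliteliLoop n (k + 1)
      (if PySem.Int.mod n k = 0 then
        PySem.Set.add (PySem.Set.add s k) (PySem.Int.floordiv n k)
      else s)
  else s
termination_by (n + 2 - k).toNat
decreasing_by exact deliteliLoop_dec n k h

def deliteli (n : Int) : List Int := deliteliLoop n 2 []

-- ===== PORT B =====
-- termination bound for the inner division loop (cited by name in its decreasing_by)
lemma divOut_dec (m p : Int) (hp : 2 ≤ p) (hm : 0 < m) (hdvd : PySem.Int.mod m p = 0) :
    (PySem.Int.floordiv m p).toNat < m.toNat := by
  have hd : p ∣ m := (PySem.Int.mod_eq_zero_iff_dvd m p).mp hdvd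
  rw [PySem.Int.floordiv_eq_ediv_of_pos (by omega)]
  have he : p * (m / p) = m := Int.mul_ediv_cancel' hd
  have hq : 0 < m / p := by nlinarith
  have hlt : m / p < m := by nlinarith
  omega

-- inner 'while m % p == 0: m //= p; e += 1' (the '2 ≤ p ∧ 0 < m' guard only makes the
-- recursion total; it holds at every call the outer loop makes)
def divOut (m p e : Int) : Int × Int :=
  if h : 2 ≤ p ∧ 0 < m ∧ PySem.Int.mod m p = 0 then
    divOut (PySem.Int.floordiv m p) p (e + 1)
  else (m, e)
termination_by m.toNat
decreasing_by exact divOut_dec m p h.1 h.2.1 h.2.2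

-- the inner loop never increases m (fuel-indexed induction on m.toNat)
lemma divOut_fst_le (k : Nat) : ∀ m p e : Int, m.toNat ≤ k → 0 ≤ m → (divOut m p e).1 ≤ m := by
  induction k with
  | zero =>
    intro m p e hk hm
    rw [divOut]
    split
    · next h => omega
    · simp
  | succ k ih =>
    intro m p e hk hm
    rw [divOut]
    split
    · next h =>
      obtain ⟨hp, hm', hdvd⟩ := h
      have hlt := divOut_dec m p hp hm' hdvd
      have h0 : 0 ≤ PySem.Int.floordiv m p := by
        rw [PySem.Int.floordiv_eq_ediv_of_pos (by omega)]
        exact Int.ediv_nonneg (by omega) (by omega)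
      have := ih (PySem.Int.floordiv m p) p (e + 1) (by omega) h0
      omega
    · simp

-- termination bounds for the outer trial loop (cited by name in its decreasing_by)
lemma factLoop_dec1 (m p : Int) (h : p * p ≤ m) :
    ((divOut m p 0).1 + 2 - (p + 1)).toNat < (m + 2 - p).toNat := by
  have hm : 0 ≤ m := le_trans (mul_self_nonneg p) h
  have h1 := divOut_fst_le m.toNat m p 0 (by omega) hm
  have hpm : p ≤ m + 1 := by nlinarith
  omega

lemma factLoop_dec2 (m p : Int) (h : p * p ≤ m) :
    (m + 2 - (p + 1)).toNat < (m + 2 - p).toNat := by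
  have hm : 0 ≤ m := le_trans (mul_self_nonneg p) h
  have hpm : p ≤ m + 1 := by nlinarith
  omega

-- outer 'while p * p <= m' trial loop collecting (prime, exponent) pairs
def factLoop (m p : Int) (acc : List (Int × Int)) : Int × List (Int × Int) :=
  if h : p * p ≤ m then
    if PySem.Int.mod m p = 0 then
      let r := divOut m p 0
      factLoop r.1 (p + 1) (acc ++ [(p, r.2)])
    else factLoop m (p + 1) acc
  else (m, acc)
termination_by (m + 2 - p).toNat
decreasing_by
  · exact factLoop_dec1 m p h
  · exact factLoop_dec2 m p h

-- 'divs = [d * p ** i for d in divs for i in range(e + 1)]'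
def genStep (ds : List Int) (pe : Int × Int) : List Int :=
  ds.flatMap (fun d => (PySem.List.pyRange 0 (pe.2 + 1) 1).map (fun i => d * pe.1 ^ i.toNat))

def deliteli_alt (n : Int) : List Int :=
  if n < 4 then []
  else
    let r := factLoop n 2 []
    let pairs := if 1 < r.1 then r.2 ++ [(r.1, 1)] else r.2
    let divs := pairs.foldl genStep [1]
    let small := PySem.List.sorted
      (((PySem.Set.ofList divs).filter (fun d => decide (2 ≤ d) && decide (d * d ≤ n))))
      (fun x => x) false
    small.foldl (fun s d => PySem.Set.add (PySem.Set.add s d) (PySem.Int.floordiv n d)) []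

-- ===== PRECONDITION & SPEC =====
def Spec_deliteli (n : Int) (out : List Int) : Prop := out = deliteli_alt n
instance (n : Int) (out : List Int) : Decidable (Spec_deliteli n out) := by unfold Spec_deliteli; infer_instance

-- ===== CLAIM (what is proved, stated in full; the proofs are below) =====
def Claim_equal_deliteli : Prop := ∀ (n : Int), Dom_deliteli n → Spec_deliteli n (deliteli n)

-- ===== LEMMAS AND PROOFS =====

-- divOut m p e divides out every factor p: m = p^j * m', p no longer divides m'
lemma divOut_spec (m p e : Int) (hp : 2 ≤ p) (hm : 0 < m) :
    ∃ j : Nat, (divOut m p e).2 = e + (j : Int) ∧ m = p ^ j * (divOut m p e).1 ∧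
      0 < (divOut m p e).1 ∧ PySem.Int.mod (divOut m p e).1 p ≠ 0 := by
  fun_induction divOut m p e with
  | case1 m e h ih =>
    obtain ⟨hp', hm', hdvd⟩ := h
    have hd : p ∣ m := (PySem.Int.mod_eq_zero_iff_dvd m p).mp hdvd
    have hfd : PySem.Int.floordiv m p = m / p :=
      PySem.Int.floordiv_eq_ediv_of_pos (by omega)
    have he : p * (m / p) = m := Int.mul_ediv_cancel' hd
    have hq : 0 < m / p := by nlinarith
    obtain ⟨j, h1, h2, h3, h4⟩ := ih (by rw [hfd]; exact hq)
    refine ⟨j + 1, ?_, ?_, h3, h4⟩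
    · rw [h1]; push_cast; ring
    · have he' : p * PySem.Int.floordiv m p = m := by rw [hfd]; exact he
      calc m = p * PySem.Int.floordiv m p := he'.symm
        _ = p * (p ^ j * (divOut (PySem.Int.floordiv m p) p (e + 1)).1) := by rw [← h2]
        _ = p ^ (j + 1) * (divOut (PySem.Int.floordiv m p) p (e + 1)).1 := by ring
  | case2 m e h =>
    simp only [not_and] at h
    refine ⟨0, by simp, by simp, hm, h hp hm⟩

-- membership in one expansion step of the divisor list
lemma mem_genStep (ds : List Int) (p e a : Int) :
    a ∈ genStep ds (p, e) ↔ ∃ d ∈ ds, ∃ j : Nat, (j : Int) ≤ e ∧ a = d * p ^ j := by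
  simp only [genStep, List.mem_flatMap, List.mem_map, PySem.List.mem_pyRange_one]
  constructor
  · rintro ⟨d, hd, i, ⟨hi0, hi1⟩, rfl⟩
    exact ⟨d, hd, i.toNat, by omega, rfl⟩
  · rintro ⟨d, hd, j, hj, rfl⟩
    exact ⟨d, hd, (j : Int), ⟨by omega, by omega⟩, by simp⟩

-- the factorization loop's invariant, pushed to its final state
lemma factLoop_post (n : Int) (m p : Int) (acc : List (Int × Int)) :
    0 < m → 2 ≤ p →
    (∀ d : Int, 2 ≤ d → d ∣ m → p ≤ d) →
    (∀ a ∈ acc.foldl genStep [1], 0 < a ∧ a ∣ n) →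
    (∀ d : Int, 0 < d →
      (d ∣ n ↔ ∃ a ∈ acc.foldl genStep [1], ∃ b, 0 < b ∧ b ∣ m ∧ d = a * b)) →
    0 < (factLoop m p acc).1 ∧
    (∀ a ∈ (factLoop m p acc).2.foldl genStep [1], 0 < a ∧ a ∣ n) ∧
    (∀ d : Int, 0 < d →
      (d ∣ n ↔ ∃ a ∈ (factLoop m p acc).2.foldl genStep [1], ∃ b,
        0 < b ∧ b ∣ (factLoop m p acc).1 ∧ d = a * b)) ∧
    (∀ d : Int, 2 ≤ d → d ∣ (factLoop m p acc).1 → d = (factLoop m p acc).1) := by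
  fun_induction factLoop m p acc with
  | case1 m p acc h hmod r ih =>
    intro hm hp hsmall hpos hcomp
    have hd : p ∣ m := (PySem.Int.mod_eq_zero_iff_dvd m p).mp hmod
    obtain ⟨j, hj2, hjm, hm1, hnd⟩ := divOut_spec m p 0 hp hm
    have hje : (divOut m p 0).2 = (j : Int) := by omega
    have hj1 : 1 ≤ j := by
      rcases Nat.eq_zero_or_pos j with h0 | h1
      · exfalso
        rw [h0, pow_zero, one_mul] at hjm
        rw [← hjm] at hnd
        exact hnd hmod
      · exact h1
    have hppos : (0:Int) < p := by omega
    have hprime : Prime p := by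
      rw [Int.prime_iff_natAbs_prime, Nat.prime_def]
      have hpn : (p.natAbs : Int) = p := Int.natAbs_of_nonneg (by omega)
      refine ⟨by omega, ?_⟩
      intro q hq
      rcases Nat.eq_zero_or_pos q with rfl | hq0
      · exfalso
        have := Nat.eq_zero_of_zero_dvd hq
        omega
      rcases Nat.lt_or_ge q 2 with h1 | h2
      · left; omega
      · right
        have hqp : (q:Int) ∣ p := by rw [← hpn]; exact_mod_cast hq
        have hqm : (q:Int) ∣ m := dvd_trans hqp hd
        have hple := hsmall q (by exact_mod_cast h2) hqm
        have hle : q ≤ p.natAbs := Nat.le_of_dvd (by omega) hq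
        omega
    have hgen : (acc ++ [(p, (divOut m p 0).2)]).foldl genStep [1]
        = genStep (acc.foldl genStep [1]) (p, (divOut m p 0).2) := by
      rw [List.foldl_append]; rfl
    apply ih hm1 (by omega)
    · -- every divisor ≥ 2 of the reduced m exceeds p
      intro d h2 hdm1
      have hdm : d ∣ m := by
        rw [hjm]; exact Dvd.dvd.mul_left hdm1 (p ^ j)
      have hpd := hsmall d h2 hdm
      have hne : d ≠ p := by
        rintro rfl
        exact hnd ((PySem.Int.mod_eq_zero_iff_dvd _ d).mpr hdm1)
      omega
    · -- positivity and divisibility of the expanded list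
      rw [hgen]
      intro a' ha'
      rw [mem_genStep] at ha'
      obtain ⟨a, ha, i, hi, rfl⟩ := ha'
      have hapos := (hpos a ha).1
      have hppow : (0:Int) < p ^ i := pow_pos hppos i
      have hij : i ≤ j := by
        rw [hje] at hi; exact_mod_cast hi
      refine ⟨by positivity, ?_⟩
      apply (hcomp (a * p ^ i) (by positivity)).mpr
      refine ⟨a, ha, p ^ i, hppow, ?_, rfl⟩
      rw [hjm]
      exact Dvd.dvd.mul_right (pow_dvd_pow p hij) _
    · -- the completeness invariant after extracting p^j
      rw [hgen]
      intro d hd0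
      constructor
      · intro hdn
        obtain ⟨a, ha, b, hb0, hbm, rfl⟩ := (hcomp _ hd0).mp hdn
        rw [hjm] at hbm
        obtain ⟨u, v, hu, hv, huv⟩ := exists_dvd_and_dvd_of_dvd_mul hbm
        have hu0 : u ≠ 0 := by rintro rfl; rw [zero_mul] at huv; omega
        have hv0 : v ≠ 0 := by rintro rfl; rw [mul_zero] at huv; omega
        have habs : |u| ∣ p ^ j := (abs_dvd u _).mpr hu
        obtain ⟨i, hij, hassoc⟩ := (dvd_prime_pow hprime j).mp habs
        have hupos : 0 < |u| := abs_pos.mpr hu0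
        have hppow : (0:Int) < p ^ i := pow_pos hppos i
        have hueq : |u| = p ^ i := by
          rcases Int.associated_iff.mp hassoc with heq | heq
          · exact heq
          · exfalso; rw [heq] at hupos; omega
        refine ⟨a * p ^ i, ?_, |v|, abs_pos.mpr hv0, (abs_dvd v _).mpr hv, ?_⟩
        · rw [mem_genStep]
          exact ⟨a, ha, i, by rw [hje]; exact_mod_cast hij, rfl⟩
        · have hb : b = |u| * |v| := by
            calc b = |b| := (abs_of_pos hb0).symm
              _ = |u * v| := by rw [huv]
              _ = |u| * |v| := abs_mul u v
          rw [hb, hueq]; ring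
      · rintro ⟨a', ha', b', hb'0, hb'm, rfl⟩
        rw [mem_genStep] at ha'
        obtain ⟨a, ha, i, hi, rfl⟩ := ha'
        have hij : i ≤ j := by rw [hje] at hi; exact_mod_cast hi
        apply (hcomp _ hd0).mpr
        refine ⟨a, ha, p ^ i * b', ?_, ?_, by ring⟩
        · have := pow_pos hppos i; positivity
        · rw [hjm]; exact mul_dvd_mul (pow_dvd_pow p hij) hb'm
  | case2 m p acc h hmod ih =>
    intro hm hp hsmall hpos hcomp
    apply ih hm (by omega) ?_ hpos hcomp
    intro d h2 hdm
    have hpd := hsmall d h2 hdm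
    have hne : d ≠ p := by
      rintro rfl
      exact hmod ((PySem.Int.mod_eq_zero_iff_dvd m d).mpr hdm)
    omega
  | case3 m p acc h =>
    intro hm hp hsmall hpos hcomp
    refine ⟨hm, hpos, hcomp, ?_⟩
    intro d h2 hdm
    obtain ⟨c, hc⟩ := hdm
    simp only at hc ⊢
    have hc0 : 0 < c := by nlinarith
    rcases lt_or_ge c 2 with h1 | h2c
    · have hc1 : c = 1 := by omega
      rw [hc1, mul_one] at hc
      omega
    · exfalso
      have hcp : p ≤ c := hsmall c (by omega) ⟨d, by rw [hc]; ring⟩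
      have hdp : p ≤ d := hsmall d h2 ⟨c, hc⟩
      apply h
      rw [hc]
      exact mul_le_mul hdp hcp (by omega) (by omega)

-- the generated divisor list holds exactly the positive divisors of n
lemma divs_char (n : Int) (hn : 4 ≤ n) (d : Int) :
    d ∈ (if 1 < (factLoop n 2 []).1 then (factLoop n 2 []).2 ++ [((factLoop n 2 []).1, 1)]
         else (factLoop n 2 []).2).foldl genStep [1] ↔ 0 < d ∧ d ∣ n := by
  obtain ⟨hmf, hposf, hcompf, hfin⟩ := factLoop_post n n 2 [] (by omega) (by omega)
    (fun d h2 _ => h2)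
    (by
      intro a ha
      simp only [List.foldl_nil, List.mem_singleton] at ha
      subst ha
      exact ⟨one_pos, one_dvd n⟩)
    (by
      intro d hd0
      constructor
      · intro hdn
        exact ⟨1, by simp, d, hd0, hdn, (one_mul d).symm⟩
      · rintro ⟨a, ha, b, hb0, hbn, rfl⟩
        simp only [List.foldl_nil, List.mem_singleton] at ha
        subst ha
        simpa using hbn)
  by_cases h1 : 1 < (factLoop n 2 []).1
  · rw [if_pos h1]
    have hgen : ((factLoop n 2 []).2 ++ [((factLoop n 2 []).1, 1)]).foldl genStep [1]
        = genStep ((factLoop n 2 []).2.foldl genStep [1]) ((factLoop n 2 []).1, 1) := by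
      rw [List.foldl_append]; rfl
    rw [hgen, mem_genStep]
    constructor
    · rintro ⟨a, ha, i, hi, rfl⟩
      obtain ⟨hap, _⟩ := hposf a ha
      have hpow : (0:Int) < (factLoop n 2 []).1 ^ i := pow_pos hmf i
      refine ⟨by positivity, ?_⟩
      apply (hcompf _ (by positivity)).mpr
      refine ⟨a, ha, (factLoop n 2 []).1 ^ i, hpow, ?_, rfl⟩
      have hi1 : i ≤ 1 := by exact_mod_cast hi
      interval_cases i
      · simp
      · simp
    · rintro ⟨hd0, hdn⟩
      obtain ⟨a, ha, b, hb0, hbmf, rfl⟩ := (hcompf _ hd0).mp hdn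
      rcases lt_or_ge b 2 with hb1 | hb2
      · have : b = 1 := by omega
        subst this
        exact ⟨a, ha, 0, by norm_num, by simp⟩
      · have hbm := hfin b (by omega) hbmf
        subst hbm
        exact ⟨a, ha, 1, by norm_num, by simp⟩
  · rw [if_neg h1]
    constructor
    · intro hd
      exact hposf d hd
    · rintro ⟨hd0, hdn⟩
      obtain ⟨a, ha, b, hb0, hbmf, rfl⟩ := (hcompf _ hd0).mp hdn
      have hmf1 : (factLoop n 2 []).1 = 1 := by omega
      rw [hmf1] at hbmf
      have hb1 : b = 1 := Int.eq_one_of_dvd_one (by omega) hbmf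
      subst hb1
      simpa using ha

-- A's loop from any k ≥ 2 is the double-add fold over the small divisors in the range
lemma loop_eq (n r : Int)
    (hr : ∀ k : Int, 2 ≤ k → (k ^ 2 ≤ n ↔ k ≤ r)) (k : Int) (s : List Int) :
    2 ≤ k → deliteliLoop n k s =
      ((PySem.List.pyRange k (r + 1) 1).filter (fun j => PySem.Int.mod n j == 0)).foldl
        (fun s j => PySem.Set.add (PySem.Set.add s j) (PySem.Int.floordiv n j)) s := by
  fun_induction deliteliLoop n k s with
  | case1 k s h ih =>
    intro hk
    have hkr : k < r + 1 := by have := (hr k hk).mp h; omega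
    rw [PySem.List.pyRange_one_cons hkr]
    by_cases hc : PySem.Int.mod n k = 0
    · rw [dif_pos hc] at ih
      rw [if_pos hc]
      simp only [List.filter_cons, hc, beq_self_eq_true, if_pos, List.foldl_cons]
      exact ih (by omega)
    · have hc' : (PySem.Int.mod n k == 0) = false := by simpa using hc
      rw [dif_neg hc] at ih
      rw [if_neg hc]
      simp only [List.filter_cons, hc', Bool.false_eq_true, if_false]
      exact ih (by omega)
  | case2 k s h =>
    intro hk
    have hkr : r + 1 ≤ k := by
      by_contra hlt
      exact h ((hr k hk).mpr (by omega))
    rw [PySem.List.pyRange_one_eq_nil hkr]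
    simp

-- ===== VERDICT (by name: the statement is the Claim_ definition above) =====
theorem deliteli_spec : Claim_equal_deliteli := by
  intro n _
  unfold Spec_deliteli deliteli deliteli_alt
  by_cases h4 : n < 4
  · rw [if_pos h4, deliteliLoop, dif_neg (by nlinarith)]
  · rw [if_neg h4]
    have hn4 : 4 ≤ n := by omega
    have hr : ∀ k : Int, 2 ≤ k → (k ^ 2 ≤ n ↔ k ≤ ((Nat.sqrt n.toNat : Nat) : Int)) := by
      intro k hk
      have hk0 : 0 ≤ k := by omega
      have hkc : ((k.toNat : Nat) : Int) = k := Int.toNat_of_nonneg hk0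
      have hnc : ((n.toNat : Nat) : Int) = n := Int.toNat_of_nonneg (by omega)
      rw [pow_two]
      constructor
      · intro h
        have h1 : k.toNat * k.toNat ≤ n.toNat := by
          rw [← hkc, ← hnc] at h
          exact_mod_cast h
        have h2 : k.toNat ≤ Nat.sqrt n.toNat := Nat.le_sqrt.mpr h1
        omega
      · intro h
        have h2 : k.toNat ≤ Nat.sqrt n.toNat := by omega
        have h1 := Nat.le_sqrt.mp h2
        rw [← hkc, ← hnc]
        exact_mod_cast h1
    rw [loop_eq n ((Nat.sqrt n.toNat : Nat) : Int) hr 2 [] (by norm_num)]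
    dsimp only
    have key : PySem.List.sorted
        ((PySem.Set.ofList ((if 1 < (factLoop n 2 []).1 then
            (factLoop n 2 []).2 ++ [((factLoop n 2 []).1, 1)]
          else (factLoop n 2 []).2).foldl genStep [1])).filter
          (fun d => decide (2 ≤ d) && decide (d * d ≤ n))) (fun x => x) false
        = (PySem.List.pyRange 2 (((Nat.sqrt n.toNat : Nat) : Int) + 1) 1).filter
            (fun j => PySem.Int.mod n j == 0) := by
      apply PySem.List.sorted_eq_of_perm_of_pairwise_lt
      · rw [List.perm_ext_iff_of_nodup]
        · intro x
          simp only [List.mem_filter, PySem.Set.mem_ofList, PySem.List.mem_pyRange_one,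
            divs_char n hn4 x, beq_iff_eq, Bool.and_eq_true, decide_eq_true_eq,
            PySem.Int.mod_eq_zero_iff_dvd]
          constructor
          · rintro ⟨⟨h2x, hxr⟩, hxd⟩
            have := (hr x h2x).mpr (by omega)
            rw [pow_two] at this
            exact ⟨⟨by omega, hxd⟩, h2x, this⟩
          · rintro ⟨⟨_, hxd⟩, h2x, hxx⟩
            have := (hr x h2x).mp (by rw [pow_two]; exact hxx)
            exact ⟨⟨h2x, by omega⟩, hxd⟩
        · exact ((PySem.List.pairwise_lt_pyRange_one _ _).filter _).imp ne_of_lt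
        · exact ((PySem.Set.nodup_ofList _).filter _)
      · exact (PySem.List.pairwise_lt_pyRange_one _ _).filter _
    rw [key]
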